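-- pv_equiv track=rewrite | github.com/MarcosLalo28/Mispronunciation-Detection-Module-Integrated-In-A-Chatbot | English_Mispronunciation_Detection.py | ErrorPronunciacion
-- ===== SOURCE A (Python) =====
-- def ErrorPronunciacion(distancia, frase):
-- 	tam_MovimientosLev = len(distancia)
-- 	tam_frase = len(frase)
--
-- 	x = frase.split(" ")
-- 	tam_palabras = len(x)
--
-- 	errores = []
-- 	palabra_idx = []
-- 	cont = 0
--
-- 	for i in range(tam_palabras):
-- 		letras = []
--
-- 		for j in range(len(x[i])):
-- 			letras.append(cont)
-- 			letras.append(x[i][j])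
-- 			cont+=1
--
-- 		palabra_idx.append(letras)
-- 		cont+=1
--
-- 	if tam_MovimientosLev != 0:
-- 		for j in range(tam_MovimientosLev):
-- 			idx = distancia[j][1]
--
-- 			for k in range(len(palabra_idx)):
-- 				if idx in palabra_idx[k]:
-- 					errores.append(x[k])
-- 	errores = list(dict.fromkeys(errores))
--
-- 	return errores
-- ===== SOURCE B (Python) =====
-- def ErrorPronunciacion(distancia, frase):
--     words = frase.split(" ")
--     owner = {}
--     pos = 0
--     for w in words:
--         for _ in w:
--             owner[pos] = w
--             pos += 1
--         pos += 1
--     errores = [owner[e[1]] for e in distancia if e[1] in owner]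
--     return list(dict.fromkeys(errores))
-- ===== Notes on version B (the rewrite author's own statement) =====
-- stated objective: alternative
-- what changed: Replaces A's per-entry linear scan over per-word [index, letter, ...] lists (membership test in a mixed int/str list) by a position->word dictionary built once, so each Levenshtein index is resolved by a dictionary lookup instead of rescanning every word.
import Mathlib
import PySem

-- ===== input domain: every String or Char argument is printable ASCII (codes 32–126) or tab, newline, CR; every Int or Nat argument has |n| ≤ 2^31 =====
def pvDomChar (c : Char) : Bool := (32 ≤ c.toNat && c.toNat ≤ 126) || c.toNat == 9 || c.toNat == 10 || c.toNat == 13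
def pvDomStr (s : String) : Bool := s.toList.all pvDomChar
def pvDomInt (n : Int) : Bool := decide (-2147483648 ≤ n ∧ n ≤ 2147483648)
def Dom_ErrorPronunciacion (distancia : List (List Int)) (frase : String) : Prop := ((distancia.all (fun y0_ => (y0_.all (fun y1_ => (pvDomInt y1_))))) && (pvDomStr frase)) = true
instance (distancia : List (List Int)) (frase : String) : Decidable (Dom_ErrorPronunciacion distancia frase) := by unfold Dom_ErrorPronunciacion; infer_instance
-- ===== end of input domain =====

-- B replaces A's per-entry scan over per-word [index, letter, ...] lists by a position->word
-- dictionary built once, so each error index is resolved by a lookup (objective: alternative).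


-- ===== PORT A =====
-- letras is a Python list mixing ints (cont) and one-char strings: Int ⊕ Char; `idx in letras`
-- is equality against each element (an int never equals a str, so only Sum.inl can match).
-- body of the inner letter loop: letras.append(cont); letras.append(x[i][j]); cont += 1
def pvLetraStep (st2 : List (Int ⊕ Char) × Int) (ch : Char) : List (Int ⊕ Char) × Int :=
  (st2.1 ++ [Sum.inl st2.2, Sum.inr ch], st2.2 + 1)
-- body of the outer word loop: build letras, palabra_idx.append(letras); cont += 1
def pvPalabraStep (st : List (List (Int ⊕ Char)) × Int) (w : String) :
    List (List (Int ⊕ Char)) × Int :=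
  let inner := w.toList.foldl pvLetraStep (([] : List (Int ⊕ Char)), st.2)
  (st.1 ++ [inner.1], inner.2 + 1)

def ErrorPronunciacion (distancia : List (List Int)) (frase : String) : List String :=
  let x := (PySem.Str.split? frase " ").getD []
  let palabraIdx := (x.foldl pvPalabraStep ([], (0 : Int))).1
  let errores :=
    if distancia.length ≠ 0 then
      distancia.foldl
        (fun errs e =>
          let idx := (PySem.List.pyGet? e 1).getD 0   -- Pre_ guarantees the index 1 exists
          -- `for k in range(len(palabra_idx))` touching x[k] and palabra_idx[k]: elementwise zip
          (x.zip palabraIdx).foldl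
            (fun errs2 p =>
              if p.2.any (fun v => match v with | Sum.inl n => n == idx | Sum.inr _ => false)
              then errs2 ++ [p.1] else errs2)
            errs)
        []
    else []
  PySem.List.dedup errores

-- ===== PORT B =====
-- body of the inner char loop: owner[pos] = w; pos += 1
def pvOwnerCharStep (w : String) (st2 : PySem.Dict Int String × Int) (_ch : Char) :
    PySem.Dict Int String × Int :=
  (st2.1.insert st2.2 w, st2.2 + 1)
-- body of the word loop: fill owner for w's characters, then pos += 1 for the space
def pvOwnerStep (st : PySem.Dict Int String × Int) (w : String) :
    PySem.Dict Int String × Int :=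
  let st2 := w.toList.foldl (pvOwnerCharStep w) st
  (st2.1, st2.2 + 1)

def ErrorPronunciacion_alt (distancia : List (List Int)) (frase : String) : List String :=
  let words := (PySem.Str.split? frase " ").getD []
  let owner := (words.foldl pvOwnerStep (PySem.Dict.empty, (0 : Int))).1
  let errores := distancia.flatMap
    (fun e =>
      match owner.get? ((PySem.List.pyGet? e 1).getD 0) with
      | some w => [w]
      | none => [])
  PySem.List.dedup errores

-- ===== PRECONDITION & SPEC =====
-- Pre_ excludes exactly the inputs where Python A raises IndexError: an entry of distancia
-- with fewer than two elements (distancia[j][1] does not exist).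
def Pre_ErrorPronunciacion (distancia : List (List Int)) (frase : String) : Prop :=
  ∀ e ∈ distancia, 2 ≤ e.length
instance (distancia : List (List Int)) (frase : String) : Decidable (Pre_ErrorPronunciacion distancia frase) := by unfold Pre_ErrorPronunciacion; infer_instance
def pvWitness_ErrorPronunciacion : List (List Int) × String := ([[1, 0], [1, 3]], "ab cd")

def Spec_ErrorPronunciacion (distancia : List (List Int)) (frase : String) (out : List String) : Prop := out = ErrorPronunciacion_alt distancia frase
instance (distancia : List (List Int)) (frase : String) (out : List String) : Decidable (Spec_ErrorPronunciacion distancia frase out) := by unfold Spec_ErrorPronunciacion; infer_instance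

-- ===== CLAIM (what is proved, stated in full; the proofs are below) =====
def Claim_equal_ErrorPronunciacion : Prop := ∀ (distancia : List (List Int)) (frase : String), Dom_ErrorPronunciacion distancia frase → Pre_ErrorPronunciacion distancia frase → Spec_ErrorPronunciacion distancia frase (ErrorPronunciacion distancia frase)

-- ===== LEMMAS AND PROOFS =====

-- the interleaved [cont, letter, cont, letter, ...] list A builds for one word
def pvBuild : List Char → Int → List (Int ⊕ Char)
  | [], _ => []
  | ch :: cs, c => Sum.inl c :: Sum.inr ch :: pvBuild cs (c + 1)

-- the per-word lists A accumulates, with word starts threaded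
def pvSpecList : List String → Int → List (List (Int ⊕ Char))
  | [], _ => []
  | w :: ws, c => pvBuild w.toList c :: pvSpecList ws (c + (w.toList.length : Int) + 1)

-- the word whose character span [start, start+len) contains idx, scanning from start offset c
def pvFindWord : List String → Int → Int → Option String
  | [], _, _ => none
  | w :: ws, c, idx =>
    if c ≤ idx ∧ idx < c + (w.toList.length : Int) then some w
    else pvFindWord ws (c + (w.toList.length : Int) + 1) idx

lemma pvInnerA_eq (cs : List Char) : ∀ (acc : List (Int ⊕ Char)) (c : Int),
    cs.foldl pvLetraStep (acc, c) = (acc ++ pvBuild cs c, c + (cs.length : Int)) := by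
  induction cs with
  | nil => intro acc c; simp [pvBuild]
  | cons ch cs ih =>
    intro acc c
    rw [List.foldl_cons]
    show List.foldl pvLetraStep (acc ++ [Sum.inl c, Sum.inr ch], c + 1) cs = _
    rw [ih, Prod.mk.injEq]
    refine ⟨by simp [pvBuild], by push_cast [List.length_cons]; ring⟩

lemma pvPalabraStep_eq (acc : List (List (Int ⊕ Char))) (c : Int) (w : String) :
    pvPalabraStep (acc, c) w = (acc ++ [pvBuild w.toList c], c + (w.toList.length : Int) + 1) := by
  simp [pvPalabraStep, pvInnerA_eq]

lemma pvMem_build (cs : List Char) : ∀ (c idx : Int),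
    (pvBuild cs c).any (fun v => match v with | Sum.inl n => n == idx | Sum.inr _ => false)
    = decide (c ≤ idx ∧ idx < c + (cs.length : Int)) := by
  induction cs with
  | nil =>
    intro c idx
    simp only [pvBuild, List.any_nil, List.length_nil]
    symm
    rw [decide_eq_false_iff_not]
    push_cast
    omega
  | cons ch cs ih =>
    intro c idx
    simp only [pvBuild, List.any_cons, ih]
    by_cases h : c = idx
    · subst h
      have h1 : (c == c) = true := by simp
      rw [h1, Bool.true_or]
      symm
      rw [decide_eq_true_eq]
      push_cast [List.length_cons]
      omega
    · have h1 : (c == idx) = false := by simpa using h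
      simp only [h1, Bool.false_or]
      rw [decide_eq_decide]
      push_cast [List.length_cons]
      omega

lemma pvOuterA_eq (ws : List String) : ∀ (acc : List (List (Int ⊕ Char))) (c : Int),
    ws.foldl pvPalabraStep (acc, c)
    = (acc ++ pvSpecList ws c,
       c + ws.foldr (fun w t => (w.toList.length : Int) + 1 + t) 0) := by
  induction ws with
  | nil => intro acc c; simp [pvSpecList]
  | cons w ws ih =>
    intro acc c
    rw [List.foldl_cons, pvPalabraStep_eq, ih, Prod.mk.injEq]
    refine ⟨by simp [pvSpecList], by simp [List.foldr_cons]; ring⟩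

lemma pvFindWord_none_of_lt (ws : List String) : ∀ (c idx : Int), idx < c →
    pvFindWord ws c idx = none := by
  induction ws with
  | nil => intro c idx _; rfl
  | cons w ws ih =>
    intro c idx h
    simp only [pvFindWord]
    rw [if_neg (by omega)]
    exact ih _ _ (by omega)

-- A's inner error scan adds nothing once idx is left of every remaining span
lemma pvScan_none (ws : List String) : ∀ (c idx : Int) (errs : List String), idx < c →
    (ws.zip (pvSpecList ws c)).foldl
      (fun errs2 p =>
        if p.2.any (fun v => match v with | Sum.inl n => n == idx | Sum.inr _ => false)
        then errs2 ++ [p.1] else errs2) errs = errs := by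
  induction ws with
  | nil => intro c idx errs _; rfl
  | cons w ws ih =>
    intro c idx errs h
    simp only [pvSpecList, List.zip_cons_cons, List.foldl_cons, pvMem_build]
    rw [if_neg (by simp; omega)]
    exact ih _ _ _ (by omega)

-- A's inner error scan appends exactly the word found by pvFindWord
lemma pvScan_eq (ws : List String) : ∀ (c idx : Int) (errs : List String),
    (ws.zip (pvSpecList ws c)).foldl
      (fun errs2 p =>
        if p.2.any (fun v => match v with | Sum.inl n => n == idx | Sum.inr _ => false)
        then errs2 ++ [p.1] else errs2) errs
    = errs ++ (pvFindWord ws c idx).toList := by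
  induction ws with
  | nil => intro c idx errs; simp [pvFindWord]
  | cons w ws ih =>
    intro c idx errs
    simp only [pvSpecList, List.zip_cons_cons, List.foldl_cons, pvMem_build, pvFindWord]
    by_cases h : c ≤ idx ∧ idx < c + (w.toList.length : Int)
    · rw [if_pos (by simpa using h), if_pos h, pvScan_none ws _ _ _ (by omega)]
      simp
    · rw [if_neg (by simpa using h), if_neg h, ih]

-- B's inner char loop: final cursor and lookups
lemma pvInnerB_eq (cs : List Char) (w : String) : ∀ (d : PySem.Dict Int String) (c idx : Int),
    (cs.foldl (pvOwnerCharStep w) (d, c)).2 = c + (cs.length : Int)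
    ∧ (cs.foldl (pvOwnerCharStep w) (d, c)).1.get? idx
      = if c ≤ idx ∧ idx < c + (cs.length : Int) then some w else d.get? idx := by
  induction cs with
  | nil =>
    intro d c idx
    refine ⟨by simp, ?_⟩
    rw [if_neg (by simp only [List.length_nil, Nat.cast_zero]; omega)]
    simp
  | cons ch cs ih =>
    intro d c idx
    rw [List.foldl_cons]
    show (List.foldl (pvOwnerCharStep w) (d.insert c w, c + 1) cs).2 = _
      ∧ (List.foldl (pvOwnerCharStep w) (d.insert c w, c + 1) cs).1.get? idx = _
    refine ⟨by rw [(ih _ _ idx).1]; push_cast [List.length_cons]; ring, ?_⟩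
    rw [(ih _ _ idx).2]
    by_cases h : c + 1 ≤ idx ∧ idx < c + 1 + (cs.length : Int)
    · rw [if_pos h, if_pos (by push_cast [List.length_cons]; omega)]
    · rw [if_neg h]
      by_cases hc : idx = c
      · subst hc
        rw [PySem.Dict.get?_insert_self, if_pos (by push_cast [List.length_cons]; omega)]
      · rw [PySem.Dict.get?_insert_of_ne _ _ hc, if_neg (by push_cast [List.length_cons]; omega)]

lemma pvOwnerStep_eq (d : PySem.Dict Int String) (c : Int) (w : String) :
    pvOwnerStep (d, c) w
    = ((w.toList.foldl (pvOwnerCharStep w) (d, c)).1, c + (w.toList.length : Int) + 1) := by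
  simp [pvOwnerStep, (pvInnerB_eq w.toList w d c 0).1]

-- B's owner dictionary answers exactly pvFindWord
lemma pvOuterB_eq (ws : List String) : ∀ (d : PySem.Dict Int String) (c idx : Int),
    (ws.foldl pvOwnerStep (d, c)).1.get? idx
    = match pvFindWord ws c idx with
      | some w => some w
      | none => d.get? idx := by
  induction ws with
  | nil => intro d c idx; simp [pvFindWord]
  | cons w ws ih =>
    intro d c idx
    rw [List.foldl_cons, pvOwnerStep_eq, ih, pvFindWord]
    by_cases h : c ≤ idx ∧ idx < c + (w.toList.length : Int)
    · rw [if_pos h, pvFindWord_none_of_lt ws _ _ (by omega)]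
      exact ((pvInnerB_eq w.toList w d c idx).2).trans (if_pos h)
    · rw [if_neg h]
      cases hf : pvFindWord ws (c + (w.toList.length : Int) + 1) idx with
      | some w' => rfl
      | none => exact ((pvInnerB_eq w.toList w d c idx).2).trans (if_neg h)

-- ===== VERDICT (by name: the statement is the Claim_ definition above) =====
theorem ErrorPronunciacion_spec : Claim_equal_ErrorPronunciacion := by
  intro distancia frase _hdom _hpre
  show _ = _
  unfold ErrorPronunciacion ErrorPronunciacion_alt
  simp only
  rw [pvOuterA_eq]
  simp only [List.nil_append]
  by_cases hd : distancia.length ≠ 0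
  · rw [if_pos hd]
    congr 1
    calc (distancia.foldl (fun errs e =>
            (((PySem.Str.split? frase " ").getD []).zip
              (pvSpecList ((PySem.Str.split? frase " ").getD []) 0)).foldl
              (fun errs2 p =>
                if p.2.any (fun v => match v with
                  | Sum.inl n => n == ((PySem.List.pyGet? e 1).getD 0) | Sum.inr _ => false)
                then errs2 ++ [p.1] else errs2) errs) [])
        = distancia.foldl (fun errs e =>
            errs ++ (pvFindWord ((PySem.Str.split? frase " ").getD []) 0
              ((PySem.List.pyGet? e 1).getD 0)).toList) [] := by
          apply PySem.List.foldl_congr_mem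
          intro errs e _
          exact pvScan_eq _ _ _ _
      _ = distancia.flatMap (fun e =>
            (pvFindWord ((PySem.Str.split? frase " ").getD []) 0
              ((PySem.List.pyGet? e 1).getD 0)).toList) := by
          rw [PySem.List.foldl_append_eq_flatMap]; simp
      _ = _ := by
          apply List.flatMap_congr
          intro e _
          rw [pvOuterB_eq]
          cases pvFindWord ((PySem.Str.split? frase " ").getD []) 0
              ((PySem.List.pyGet? e 1).getD 0) <;> simp
  · rw [if_neg hd]
    have hnil : distancia = [] := by
      cases distancia with
      | nil => rfl
      | cons a l => simp at hd
    subst hnil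
    rfl
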